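-- pv_equiv track=rewrite | github.com/thealper2/codewars-solutions | 6-kyu/the_mysterious_wall.py | build_a_wall
-- ===== SOURCE A (Python) =====
-- def build_a_wall(x=None,y=None):
--     if not isinstance(x, int) or not isinstance(y, int) or x < 1 or y < 1:
--         return None
--
--     if x * y > 10000:
--         return "Naah, too much...here's my resignation."
--
--     rows = []
--     for i in range(x):
--         if (x - i) % 2 == 1:
--             row = "■■|" * (y - 1) + "■■"
--         else:
--             row = "■|" + "■■|" * (y - 2) + "■■|■" if y > 1 else "■"
--         rows.append(row)
--
--     return '\n'.join(rows)
-- ===== SOURCE B (Python) =====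
-- def build_a_wall(x=None, y=None):
--     if not isinstance(x, int) or not isinstance(y, int) or x < 1 or y < 1:
--         return None
--     if x * y > 10000:
--         return "Naah, too much...here's my resignation."
--     if y == 1:
--         return '\n'.join("■" * (2 - j % 2) for j in range(x - 1, -1, -1))
--     # Per-character generation: counting rows j upward from the bottom, a row is a
--     # "full-brick" row when j is even (width 3y-1, '|' where c % 3 == 2) and a
--     # "half-brick" row when j is odd (width 3y, '|' where c % 3 == 1).
--     return '\n'.join(
--         ''.join('|' if c % 3 == 2 - j % 2 else '■' for c in range(3 * y - 1 + j % 2))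
--         for j in range(x - 1, -1, -1))
-- ===== Notes on version B (the rewrite author's own statement) =====
-- stated objective: alternative
-- what changed: B generates the wall per character with modular arithmetic (row j counted upward from the bottom is pipe at column c iff c % 3 == 2 - j % 2, width 3y-1+j%2), instead of A's per-row parity test against the top with string repetition and concatenation.
import Mathlib
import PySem

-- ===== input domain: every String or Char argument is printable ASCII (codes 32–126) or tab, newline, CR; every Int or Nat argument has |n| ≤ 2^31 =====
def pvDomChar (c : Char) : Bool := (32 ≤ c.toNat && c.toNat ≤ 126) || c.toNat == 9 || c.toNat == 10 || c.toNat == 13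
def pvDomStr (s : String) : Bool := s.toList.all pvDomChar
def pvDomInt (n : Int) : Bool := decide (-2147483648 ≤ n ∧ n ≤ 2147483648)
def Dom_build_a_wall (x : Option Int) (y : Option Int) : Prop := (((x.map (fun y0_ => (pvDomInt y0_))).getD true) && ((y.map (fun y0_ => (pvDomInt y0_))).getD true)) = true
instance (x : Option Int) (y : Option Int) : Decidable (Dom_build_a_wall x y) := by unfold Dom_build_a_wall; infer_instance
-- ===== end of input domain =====

-- B generates the wall per character with modular arithmetic, bottom-up (row j from the
-- bottom: pipes where c % 3 == 2 - j % 2), instead of A's per-row parity test with string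
-- repetition; the return values are proved equal on all inputs (objective: alternative).

-- exact port of Python's string repetition s * n (n ≤ 0 gives "")
def pyStrMul (s : String) (n : Int) : String := PySem.Str.join "" (List.replicate n.toNat s)

-- ===== PORT A =====
def build_a_wall (x : Option Int) (y : Option Int) : Option String :=
  match x, y with
  | some xv, some yv =>
    if xv < 1 ∨ yv < 1 then none
    else if xv * yv > 10000 then some "Naah, too much...here's my resignation."
    else
      let rows := (PySem.List.pyRange 0 xv 1).foldl (fun acc i =>
        acc ++ [if PySem.Int.mod (xv - i) 2 = 1 then
                  pyStrMul "■■|" (yv - 1) ++ "■■"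
                else if yv > 1 then "■|" ++ pyStrMul "■■|" (yv - 2) ++ "■■|■" else "■"]) []
      some (PySem.Str.join "\n" rows)
  | _, _ => none

-- ===== PORT B =====
-- B's own port of Python's string repetition s * n (n ≤ 0 gives "")
def pyRepB (s : String) (n : Int) : String := PySem.Str.join "" (List.replicate n.toNat s)

def build_a_wall_alt (x : Option Int) (y : Option Int) : Option String :=
  match x with
  | none => none
  | some xv =>
  match y with
  | none => none
  | some yv =>
    if xv < 1 ∨ yv < 1 then none
    else if xv * yv > 10000 then some "Naah, too much...here's my resignation."
    else if yv = 1 then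
      some (PySem.Str.join "\n" ((PySem.List.pyRange (xv - 1) (-1) (-1)).map
        (fun j => pyRepB "■" (2 - PySem.Int.mod j 2))))
    else
      some (PySem.Str.join "\n" ((PySem.List.pyRange (xv - 1) (-1) (-1)).map
        (fun j => PySem.Str.join "" ((PySem.List.pyRange 0 (3 * yv - 1 + PySem.Int.mod j 2) 1).map
          (fun c => if PySem.Int.mod c 3 = 2 - PySem.Int.mod j 2 then "|" else "■")))))

-- ===== PRECONDITION & SPEC =====
def Spec_build_a_wall (x : Option Int) (y : Option Int) (out : Option String) : Prop := out = build_a_wall_alt x y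
instance (x : Option Int) (y : Option Int) (out : Option String) : Decidable (Spec_build_a_wall x y out) := by unfold Spec_build_a_wall; infer_instance

-- ===== CLAIM (what is proved, stated in full; the proofs are below) =====
def Claim_equal_build_a_wall : Prop := ∀ (x : Option Int) (y : Option Int), Dom_build_a_wall x y → Spec_build_a_wall x y (build_a_wall x y)

-- ===== LEMMAS AND PROOFS =====

-- join with empty separator is flatten
theorem joinCharsNil (ls : List (List Char)) : PySem.Chars.join [] ls = ls.flatten := by
  show List.intercalate [] ls = ls.flatten
  induction ls with
  | nil => rfl
  | cons h t ih =>
    cases t with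
    | nil => simp [List.intercalate]
    | cons a b =>
      simp only [List.intercalate, List.intersperse] at *
      simp_all [List.flatten]

theorem toList_pyStrMul (s : String) (n : Int) :
    (pyStrMul s n).toList = (List.replicate n.toNat s.toList).flatten := by
  simp [pyStrMul, PySem.Str.toList_join, joinCharsNil, List.map_replicate]

-- character pattern of a full-brick row (Nat level)
theorem oddRowChars (m : Nat) :
    (List.range (3 * m + 2)).map (fun k => if k % 3 = 2 then '|' else '■')
      = (List.replicate m ['■', '■', '|']).flatten ++ ['■', '■'] := by
  induction m with
  | zero => decide
  | succ m ih =>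
    have h5 : 3 * (m + 1) + 2 = (3 * m + 2) + 1 + 1 + 1 := by ring
    rw [h5, List.range_succ, List.range_succ, List.range_succ]
    have e1 : ((3 * m + 2) % 3) = 2 := by omega
    have e2 : ((3 * m + 2 + 1) % 3) = 0 := by omega
    have e3 : ((3 * m + 2 + 1 + 1) % 3) = 1 := by omega
    rw [List.replicate_succ', List.flatten_append]
    simp [ih, e1, e2, e3]

-- character pattern of a half-brick row (Nat level)
theorem evenRowChars (m : Nat) :
    (List.range (3 * m + 6)).map (fun k => if k % 3 = 1 then '|' else '■')
      = ['■', '|'] ++ (List.replicate m ['■', '■', '|']).flatten ++ ['■', '■', '|', '■'] := by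
  induction m with
  | zero => decide
  | succ m ih =>
    have h5 : 3 * (m + 1) + 6 = (3 * m + 6) + 1 + 1 + 1 := by ring
    rw [h5, List.range_succ, List.range_succ, List.range_succ]
    have e1 : ((3 * m + 6) % 3) = 0 := by omega
    have e2 : ((3 * m + 6 + 1) % 3) = 1 := by omega
    have e3 : ((3 * m + 6 + 1 + 1) % 3) = 2 := by omega
    rw [List.replicate_succ', List.flatten_append]
    simp [ih, e1, e2, e3]

-- flatten of singleton lists is the map itself
theorem flatten_map_singleton {α β : Type} (g : α → β) (l : List α) :
    (l.map (fun a => [g a])).flatten = l.map g := by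
  induction l with
  | nil => rfl
  | cons a t ih => simp [ih]

-- toList of B's per-character row builder
theorem toList_charRow (w : Nat) (p : Int) :
    (PySem.Str.join "" ((PySem.List.pyRange 0 ((w : Int)) 1).map
        (fun c => if PySem.Int.mod c 3 = p then "|" else "■"))).toList
      = (List.range w).map (fun k : Nat => if ((k : Int) % 3) = p then '|' else '■') := by
  rw [PySem.Str.toList_join]
  have hsep : ("" : String).toList = [] := rfl
  rw [hsep, joinCharsNil, PySem.List.pyRange_zero_nat, List.map_map, List.map_map]
  have hstep : ∀ k ∈ List.range w,
      ((String.toList ∘ fun c => if PySem.Int.mod c 3 = p then ("|" : String) else "■") ∘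
        (fun k : Nat => ((k : Int)))) k
        = [if ((k : Int) % 3) = p then '|' else '■'] := by
    intro k _
    have hm : PySem.Int.mod ((k : Int)) 3 = (k : Int) % 3 :=
      PySem.Int.mod_eq_emod_of_pos (by omega)
    simp only [Function.comp_def, hm]
    split <;> rfl
  rw [List.map_congr_left hstep, flatten_map_singleton]

-- a full-brick row, as B builds it, equals A's string for it
theorem oddRowEq (m : Nat) :
    PySem.Str.join "" ((PySem.List.pyRange 0 (3 * (m : Int) + 2) 1).map
        (fun c => if PySem.Int.mod c 3 = 2 then "|" else "■"))
      = pyStrMul "■■|" (m : Int) ++ "■■" := by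
  apply String.toList_inj.mp
  have hb : (3 * (m : Int) + 2) = ((3 * m + 2 : Nat) : Int) := by push_cast; ring
  rw [hb, toList_charRow, String.toList_append, toList_pyStrMul]
  have hms : ((m : Int)).toNat = m := rfl
  rw [hms]
  have hcond : ∀ k ∈ List.range (3 * m + 2),
      (if ((k : Int) % 3) = (2 : Int) then '|' else '■') = (if k % 3 = 2 then ('|' : Char) else '■') := by
    intro k _
    have : ((k : Int) % 3 = (2 : Int)) ↔ (k % 3 = 2) := by omega
    simp only [this]
  rw [List.map_congr_left hcond, oddRowChars]
  rfl

-- a half-brick row, as B builds it, equals A's string for it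
theorem evenRowEq (m : Nat) :
    PySem.Str.join "" ((PySem.List.pyRange 0 (3 * (m : Int) + 6) 1).map
        (fun c => if PySem.Int.mod c 3 = 1 then "|" else "■"))
      = "■|" ++ pyStrMul "■■|" (m : Int) ++ "■■|■" := by
  apply String.toList_inj.mp
  have hb : (3 * (m : Int) + 6) = ((3 * m + 6 : Nat) : Int) := by push_cast; ring
  rw [hb, toList_charRow, String.toList_append, String.toList_append, toList_pyStrMul]
  have hms : ((m : Int)).toNat = m := rfl
  rw [hms]
  have hcond : ∀ k ∈ List.range (3 * m + 6),
      (if ((k : Int) % 3) = (1 : Int) then '|' else '■') = (if k % 3 = 1 then ('|' : Char) else '■') := by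
    intro k _
    have : ((k : Int) % 3 = (1 : Int)) ↔ (k % 3 = 1) := by omega
    simp only [this]
  rw [List.map_congr_left hcond, evenRowChars]
  rfl

-- ===== VERDICT (by name: the statement is the Claim_ definition above) =====
theorem build_a_wall_spec : Claim_equal_build_a_wall := by
  intro x y _
  unfold Spec_build_a_wall build_a_wall build_a_wall_alt
  match x, y with
  | none, none => rfl
  | none, some _ => rfl
  | some _, none => rfl
  | some xv, some yv =>
    simp only
    by_cases h1 : xv < 1 ∨ yv < 1
    · rw [if_pos h1, if_pos h1]
    · rw [if_neg h1, if_neg h1]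
      by_cases h2 : xv * yv > 10000
      · rw [if_pos h2, if_pos h2]
      · rw [if_neg h2, if_neg h2]
        have hx : 1 ≤ xv := by omega
        have hy : 1 ≤ yv := by omega
        simp only [PySem.List.foldl_append_singleton_eq_map, List.nil_append]
        have hA : PySem.List.pyRange 0 xv 1 = (List.range xv.toNat).map (fun k : Nat => ((k : Int))) := by
          rw [PySem.List.pyRange_one, show xv - 0 = xv from by ring]
          exact List.map_congr_left (fun k _ => by ring)
        have hB : PySem.List.pyRange (xv - 1) (-1) (-1)
            = (List.range xv.toNat).map (fun k : Nat => (xv - 1 - (k : Int))) := by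
          rw [PySem.List.pyRange_neg_one, show (xv - 1 - (-1)).toNat = xv.toNat from by omega]
        have hmod2 : ∀ a : Int, PySem.Int.mod a 2 = a % 2 := fun a =>
          PySem.Int.mod_eq_emod_of_pos (by omega)
        by_cases hy1 : yv = 1
        · rw [if_pos hy1, hA, hB, List.map_map, List.map_map]
          subst hy1
          congr 2
          apply List.map_congr_left
          intro k _
          simp only [Function.comp_def, hmod2]
          by_cases hp : (xv - (k : Int)) % 2 = 1
          · have hj : (xv - 1 - (k : Int)) % 2 = 0 := by omega
            rw [if_pos hp, hj]
            decide
          · have hj : (xv - 1 - (k : Int)) % 2 = 1 := by omega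
            rw [if_neg hp, hj]
            decide
        · rw [if_neg hy1, hA, hB, List.map_map, List.map_map]
          congr 2
          apply List.map_congr_left
          intro k _
          simp only [Function.comp_def, hmod2]
          by_cases hp : (xv - (k : Int)) % 2 = 1
          · have hj : (xv - 1 - (k : Int)) % 2 = 0 := by omega
            rw [if_pos hp, hj]
            simp only [add_zero, sub_zero]
            rw [show (3 * yv - 1 : Int) = 3 * (((yv - 1).toNat : Int)) + 2 from by omega,
              show (yv - 1 : Int) = (((yv - 1).toNat : Int)) from by omega]
            exact (oddRowEq (yv - 1).toNat).symm
          · have hj : (xv - 1 - (k : Int)) % 2 = 1 := by omega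
            rw [if_neg hp, hj, if_pos (by omega : yv > 1)]
            rw [show (2 : Int) - 1 = 1 from by norm_num,
              show (3 * yv - 1 + 1 : Int) = 3 * (((yv - 2).toNat : Int)) + 6 from by omega,
              show (yv - 2 : Int) = (((yv - 2).toNat : Int)) from by omega]
            exact (evenRowEq (yv - 2).toNat).symm
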